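-- pv_equiv track=rewrite | github.com/davidiach/erdos97 | scripts/c45_c49_r44_sparse_probe.py | pair_overlap_max
-- ===== SOURCE A (Python) =====
-- import itertools
--
-- def pair_overlap_max(S):
--     n = len(S)
--     sets = [set(row) for row in S]
--     worst = 0
--     bad = []
--     for i, j in itertools.combinations(range(n), 2):
--         c = len(sets[i] & sets[j])
--         if c > 2:
--             bad.append((i, j, c))
--         if c > worst:
--             worst = c
--     return worst, bad
-- ===== SOURCE B (Python) =====
-- def pair_overlap_max(S):
--     occ = {}
--     for i, row in enumerate(S):
--         for x in dict.fromkeys(row):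
--             occ.setdefault(x, []).append(i)
--     cnt = {}
--     for idxs in occ.values():
--         m = len(idxs)
--         for a in range(m):
--             for b in range(a + 1, m):
--                 key = (idxs[a], idxs[b])
--                 cnt[key] = cnt.get(key, 0) + 1
--     worst = max(cnt.values(), default=0)
--     bad = sorted(((i, j, c) for (i, j), c in cnt.items() if c > 2),
--                  key=lambda t: (t[0], t[1]))
--     return worst, bad
-- ===== Notes on version B (the rewrite author's own statement) =====
-- stated objective: alternative
-- what changed: B replaces A's scan over all O(n^2) index pairs with per-pair set intersection by an inverted index from element to the sets containing it, counting co-occurring index pairs in a dictionary and sorting the over-threshold pairs afterwards.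
import Mathlib
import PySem

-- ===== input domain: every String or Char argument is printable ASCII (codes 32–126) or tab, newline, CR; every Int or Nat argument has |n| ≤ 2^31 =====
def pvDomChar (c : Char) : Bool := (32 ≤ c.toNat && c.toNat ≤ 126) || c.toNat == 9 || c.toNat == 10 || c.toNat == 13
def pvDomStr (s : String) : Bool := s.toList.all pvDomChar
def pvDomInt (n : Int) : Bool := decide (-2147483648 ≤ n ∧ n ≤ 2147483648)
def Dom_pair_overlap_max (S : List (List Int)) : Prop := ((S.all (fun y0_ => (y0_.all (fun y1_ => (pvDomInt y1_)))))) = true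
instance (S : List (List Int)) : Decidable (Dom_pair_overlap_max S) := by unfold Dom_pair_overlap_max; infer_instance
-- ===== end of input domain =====

-- B replaces A's all-pairs set-intersection scan by an inverted index (element -> list of
-- set indices), counting each co-occurring pair once per shared element; alternative algorithm
-- of comparable measured cost.

-- ===== PORT A =====
def pair_overlap_max (S : List (List Int)) : Int × (List (Int × Int × Int)) :=
  let n : Int := PySem.List.len S
  let sets : List (PySem.Set Int) := S.map (fun row => PySem.Set.ofList row)
  let st := (PySem.List.combinations (PySem.List.pyRange 0 n 1) 2).foldl
    (fun (st : Int × List (Int × Int × Int)) pr =>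
      match pr with
      | [i, j] =>
        let c : Int := PySem.Set.len (PySem.Set.inter (PySem.List.pyGetD sets i [])
          (PySem.List.pyGetD sets j []))
        let bad := if c > 2 then st.2 ++ [(i, j, c)] else st.2
        let worst := if c > st.1 then c else st.1
        (worst, bad)
      | _ => st) ((0 : Int), ([] : List (Int × Int × Int)))
  (st.1, st.2)

-- ===== PORT B =====
def pair_overlap_max_alt (S : List (List Int)) : Int × (List (Int × Int × Int)) :=
  let occ : PySem.Dict Int (List Int) :=
    (PySem.List.enumerate S).foldl (fun d p =>
      (PySem.List.dedup p.2).foldl (fun d x => d.modify x [] (· ++ [p.1])) d) PySem.Dict.empty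
  let cnt : PySem.Dict (Int × Int) Int :=
    occ.values.foldl (fun d idxs =>
      let m : Int := PySem.List.len idxs
      (PySem.List.pyRange 0 m 1).foldl (fun d a =>
        (PySem.List.pyRange (a + 1) m 1).foldl (fun d b =>
          let key := (PySem.List.pyGetD idxs a 0, PySem.List.pyGetD idxs b 0)
          d.insert key (d.getD key 0 + 1)) d) d) PySem.Dict.empty
  let worst : Int := PySem.List.maxD cnt.values (fun v => v) 0
  let bad : List (Int × Int × Int) :=
    PySem.List.sorted2 ((cnt.items.filter (fun p => decide (2 < p.2))).map
      (fun p => (p.1.1, p.1.2, p.2))) (fun t => t.1) (fun t => t.2.1)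
  (worst, bad)

-- ===== PRECONDITION & SPEC =====
def Spec_pair_overlap_max (S : List (List Int)) (out : Int × (List (Int × Int × Int))) : Prop := out = pair_overlap_max_alt S
instance (S : List (List Int)) (out : Int × (List (Int × Int × Int))) : Decidable (Spec_pair_overlap_max S out) := by unfold Spec_pair_overlap_max; infer_instance

-- ===== CLAIM (what is proved, stated in full; the proofs are below) =====
def Claim_equal_pair_overlap_max : Prop := ∀ (S : List (List Int)), Dom_pair_overlap_max S → Spec_pair_overlap_max S (pair_overlap_max S)

-- ===== LEMMAS AND PROOFS =====

-- all ordered pairs (earlier, later) of a list, in order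
def lexPairs {α : Type} : List α → List (α × α)
  | [] => []
  | x :: xs => (xs.map (fun y => (x, y))) ++ lexPairs xs

-- the flattened (element, set-index) stream B's first loop feeds into occ
def LmapS (S : List (List Int)) : List (Int × Int) :=
  (PySem.List.enumerate S).flatMap (fun p => (PySem.List.dedup p.2).map (fun x => (x, p.1)))

-- indices of the sets containing x, in increasing order
def occL (S : List (List Int)) (x : Int) : List Int :=
  ((PySem.List.enumerate S).filter (fun p => decide (x ∈ p.2))).map (·.1)

-- B's occ dictionary
def occD (S : List (List Int)) : PySem.Dict Int (List Int) :=
  (PySem.List.enumerate S).foldl (fun d p =>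
    (PySem.List.dedup p.2).foldl (fun d x => d.modify x [] (· ++ [p.1])) d) PySem.Dict.empty

-- B's cnt dictionary
def cntD (S : List (List Int)) : PySem.Dict (Int × Int) Int :=
  (occD S).values.foldl (fun d idxs =>
    let m : Int := PySem.List.len idxs
    (PySem.List.pyRange 0 m 1).foldl (fun d a =>
      (PySem.List.pyRange (a + 1) m 1).foldl (fun d b =>
        let key := (PySem.List.pyGetD idxs a 0, PySem.List.pyGetD idxs b 0)
        d.insert key (d.getD key 0 + 1)) d) d) PySem.Dict.empty

-- the distinct elements appearing anywhere, in first-appearance order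
def KeyS (S : List (List Int)) : List Int := PySem.Set.ofList ((LmapS S).map (·.1))

-- the multiset of co-occurring index pairs B counts
def PallS (S : List (List Int)) : List (Int × Int) := (occD S).values.flatMap lexPairs

-- the overlap count A computes for a pair of indices
def cOf (S : List (List Int)) (q : Int × Int) : Int :=
  PySem.Set.len (PySem.Set.inter (PySem.List.pyGetD (S.map (fun row => PySem.Set.ofList row)) q.1 [])
    (PySem.List.pyGetD (S.map (fun row => PySem.Set.ofList row)) q.2 []))

-- the ordered index pairs A iterates over
def RngP (S : List (List Int)) : List (Int × Int) :=
  lexPairs (PySem.List.pyRange 0 (PySem.List.len S) 1)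

-- strict lex order on two keys (sorted(..., key=lambda t: (t[0], t[1])) sorts by it)
def RltK {α κ₁ κ₂ : Type} [LT κ₁] [LT κ₂] (k1 : α → κ₁) (k2 : α → κ₂) (a b : α) : Prop :=
  k1 a < k1 b ∨ (k1 a = k1 b ∧ k2 a < k2 b)

theorem comb2 {α : Type} (xs : List α) :
    PySem.List.combinations xs 2 = (lexPairs xs).map (fun p => [p.1, p.2]) := by
  induction xs with
  | nil => simp [PySem.List.combinations_nil_succ, lexPairs]
  | cons x t ih =>
    rw [show (2:Nat) = 1 + 1 from rfl, PySem.List.combinations_cons_succ,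
      PySem.List.combinations_one]
    simp [lexPairs, ih, Function.comp]

-- A computes a running max and a filtered list over the ordered index pairs
theorem A_char (S : List (List Int)) :
    pair_overlap_max S =
      ((RngP S).foldl (fun w q => if cOf S q > w then cOf S q else w) 0,
       (RngP S).foldl (fun b q => if cOf S q > 2 then b ++ [(q.1, q.2, cOf S q)] else b) []) := by
  simp only [pair_overlap_max]
  rw [comb2, List.foldl_map]
  exact PySem.List.foldl_prod_mk
    (f := fun w (q : Int × Int) => if cOf S q > w then cOf S q else w)
    (g := fun b (q : Int × Int) => if cOf S q > 2 then b ++ [(q.1, q.2, cOf S q)] else b)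
    (l := RngP S) (a := 0) (b := [])

theorem alt_char (S : List (List Int)) :
    pair_overlap_max_alt S =
      (PySem.List.maxD (cntD S).values (fun v => v) 0,
       PySem.List.sorted2 (((cntD S).items.filter (fun p => decide (2 < p.2))).map
         (fun p => (p.1.1, p.1.2, p.2))) (fun t => t.1) (fun t => t.2.1)) := by
  rfl

theorem occD_eq_flat (S : List (List Int)) :
    occD S = (LmapS S).foldl (fun d q => d.modify q.1 [] (· ++ [q.2])) PySem.Dict.empty := by
  unfold occD LmapS
  rw [List.foldl_flatMap]
  apply PySem.List.foldl_congr_mem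
  intro d p _
  rw [List.foldl_map]


theorem pairfilter {a : Type} [DecidableEq a] (i x : a) : ∀ (l : List a), l.Nodup →
    ((l.map (fun y => (y, i))).filter (fun q => q.1 == x)).map (·.2)
      = if x ∈ l then [i] else [] := by
  intro l
  induction l with
  | nil => simp
  | cons z t ih =>
    intro hnd
    have hzt : z ∉ t := (List.nodup_cons.1 hnd).1
    have ht := (List.nodup_cons.1 hnd).2
    by_cases hzx : z = x
    · subst hzx
      simp [ih ht, hzt]
    · have hbe : (z == x) = false := by simp [hzx]
      simp only [List.map_cons, List.filter_cons, hbe, Bool.false_eq_true, if_false]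
      rw [ih ht]
      simp [hzx, Ne.symm hzx]

theorem flatMap_if_singleton {a b : Type} (P : a → Prop) [DecidablePred P] (f : a → b) :
    ∀ (E : List a), E.flatMap (fun p => if P p then [f p] else [])
      = (E.filter (fun p => decide (P p))).map f := by
  intro E
  induction E with
  | nil => rfl
  | cons p t ih =>
    by_cases h : P p
    · simp [h, ih]
    · simp [h, ih]

theorem getD_occD (S : List (List Int)) (x : Int) :
    (occD S).getD x [] = occL S x := by
  rw [occD_eq_flat, PySem.Dict.getD_foldl_modify_append]
  have hemp : (PySem.Dict.empty : PySem.Dict Int (List Int)).getD x [] = [] := rfl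
  rw [hemp, List.nil_append]
  unfold LmapS occL
  rw [List.filter_flatMap, List.map_flatMap,
    ← flatMap_if_singleton (fun p : Int × List Int => x ∈ p.2) (fun p => p.1)]
  apply List.flatMap_congr
  intro p hp
  rw [pairfilter p.1 x (PySem.List.dedup p.2) (by rw [PySem.List.dedup_eq_ofList]; exact PySem.Set.nodup_ofList p.2)]
  rw [PySem.List.dedup_eq_ofList]
  by_cases h : x ∈ p.2
  · rw [if_pos ((PySem.Set.mem_ofList _ _).2 h), if_pos h]
  · rw [if_neg (fun hh => h ((PySem.Set.mem_ofList _ _).1 hh)), if_neg h]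

theorem foldl_range_pairs {β : Type} (h : β → Int → Int → β) (m : Int) :
    ∀ (a : Int) (d0 : β),
    (PySem.List.pyRange a m 1).foldl
        (fun d i => (PySem.List.pyRange (i + 1) m 1).foldl (fun d j => h d i j) d) d0
      = (lexPairs (PySem.List.pyRange a m 1)).foldl (fun d q => h d q.1 q.2) d0 := by
  intro a
  by_cases hend : m ≤ a
  · intro d0; rw [PySem.List.pyRange_one_eq_nil hend]; rfl
  · push_neg at hend
    have hn : ((m - (a + 1)).toNat) < ((m - a).toNat) := by omega
    intro d0
    rw [PySem.List.pyRange_one_cons hend]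
    show (PySem.List.pyRange (a + 1) m 1).foldl _
      ((PySem.List.pyRange (a + 1) m 1).foldl (fun d j => h d a j) d0) = _
    rw [foldl_range_pairs h m (a + 1)]
    show _ = ((PySem.List.pyRange (a + 1) m 1).map (fun y => (a, y))
      ++ lexPairs (PySem.List.pyRange (a + 1) m 1)).foldl _ d0
    rw [List.foldl_append, List.foldl_map]
termination_by a => (m - a).toNat
decreasing_by exact hn


theorem lexPairs_map {α β : Type} (f : α → β) (xs : List α) :
    lexPairs (xs.map f) = (lexPairs xs).map (Prod.map f f) := by
  induction xs with
  | nil => rfl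
  | cons x t ih => simp [lexPairs, ih, Function.comp]


theorem keys_occD (S : List (List Int)) : (occD S).keys = KeyS S := by
  rw [occD_eq_flat]
  rw [PySem.Dict.keys_foldl_modify_key (LmapS S) (fun q => q.1) []
    (fun _ q => (· ++ [q.2])) PySem.Dict.empty]
  have hemp : (PySem.Dict.empty : PySem.Dict Int (List Int)).keys = [] := rfl
  rw [hemp, PySem.Set.update_nil_left]
  rfl

theorem nodup_keys_occD (S : List (List Int)) : (occD S).keys.Nodup := by
  rw [keys_occD]; exact PySem.Set.nodup_ofList _

theorem values_occD (S : List (List Int)) :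
    (occD S).values = (KeyS S).map (occL S) := by
  rw [PySem.Dict.values_eq_map_keys (occD S) (nodup_keys_occD S) [], keys_occD]
  exact List.map_congr_left (fun k _ => getD_occD S k)

theorem pairwise_occL (S : List (List Int)) (x : Int) : (occL S x).Pairwise (· < ·) := by
  unfold occL
  apply List.pairwise_map.2
  exact (PySem.List.pairwise_lt_enumerate S 0).filter _

theorem mem_occL (S : List (List Int)) (x : Int) (i : Int) :
    i ∈ occL S x ↔ ∃ (k : Nat) (h : k < S.length), i = (k : Int) ∧ x ∈ S[k] := by
  unfold occL
  simp only [List.mem_map, List.mem_filter, PySem.List.mem_enumerate_iff, decide_eq_true_eq]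
  constructor
  · rintro ⟨p, ⟨⟨k, hk, rfl⟩, hx⟩, rfl⟩
    exact ⟨k, hk, by simp, hx⟩
  · rintro ⟨k, hk, rfl, hx⟩
    exact ⟨((k : Int), S[k]), ⟨⟨k, hk, by simp⟩, hx⟩, rfl⟩

theorem cntD_eq_flat (S : List (List Int)) :
    cntD S = (PallS S).foldl (fun d q => d.insert q (d.getD q 0 + 1)) PySem.Dict.empty := by
  unfold cntD PallS
  rw [List.foldl_flatMap]
  apply PySem.List.foldl_congr_mem
  intro d idxs _
  show (PySem.List.pyRange 0 (PySem.List.len idxs) 1).foldl _ d = _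
  rw [foldl_range_pairs (fun d i j =>
    d.insert (PySem.List.pyGetD idxs i 0, PySem.List.pyGetD idxs j 0)
      (d.getD (PySem.List.pyGetD idxs i 0, PySem.List.pyGetD idxs j 0) 0 + 1)) (PySem.List.len idxs) 0 d]
  conv_rhs => rw [show idxs = (PySem.List.pyRange 0 (PySem.List.len idxs) 1).map
    (fun j => PySem.List.pyGetD idxs j 0) from (PySem.List.map_pyGetD_pyRange_zero idxs 0).symm]
  rw [lexPairs_map, List.foldl_map]
  rfl

theorem mem_of_mem_lexPairs {α : Type} {xs : List α} {q : α × α} (h : q ∈ lexPairs xs) :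
    q.1 ∈ xs ∧ q.2 ∈ xs := by
  induction xs with
  | nil => simp [lexPairs] at h
  | cons x t ih =>
    rw [lexPairs, List.mem_append] at h
    rcases h with h | h
    · obtain ⟨y, hy, rfl⟩ := List.mem_map.1 h
      exact ⟨List.mem_cons_self .., List.mem_cons_of_mem _ hy⟩
    · exact ⟨List.mem_cons_of_mem _ (ih h).1, List.mem_cons_of_mem _ (ih h).2⟩

theorem mem_lexPairs {α : Type} [LinearOrder α] (xs : List α) (hs : xs.Pairwise (· < ·))
    (q : α × α) : q ∈ lexPairs xs ↔ q.1 ∈ xs ∧ q.2 ∈ xs ∧ q.1 < q.2 := by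
  obtain ⟨i, j⟩ := q
  induction xs with
  | nil => simp [lexPairs]
  | cons x t ih =>
    have hx : ∀ y ∈ t, x < y := fun y hy => (List.pairwise_cons.1 hs).1 y hy
    have hxt : x ∉ t := fun hxx => lt_irrefl x (hx x hxx)
    simp only [lexPairs, List.mem_append, List.mem_map, List.mem_cons,
      ih (List.pairwise_cons.1 hs).2, Prod.mk.injEq]
    constructor
    · rintro (⟨y, hy, rfl, rfl⟩ | ⟨h1, h2, h3⟩)
      · exact ⟨Or.inl rfl, Or.inr hy, hx _ hy⟩
      · exact ⟨Or.inr h1, Or.inr h2, h3⟩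
    · rintro ⟨h1 | h1, h2 | h2, h3⟩
      · subst h1; subst h2; exact (lt_irrefl _ h3).elim
      · subst h1; exact Or.inl ⟨j, h2, rfl, rfl⟩
      · subst h2; exact ((lt_asymm h3) (hx _ h1)).elim
      · exact Or.inr ⟨h1, h2, h3⟩

theorem count_lexPairs {α : Type} [LinearOrder α] [DecidableEq α] (xs : List α)
    (hs : xs.Pairwise (· < ·)) (i j : α) :
    (lexPairs xs).count (i, j) = if i ∈ xs ∧ j ∈ xs ∧ i < j then 1 else 0 := by
  induction xs with
  | nil => simp [lexPairs]
  | cons x t ih =>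
    have hx : ∀ y ∈ t, x < y := fun y hy => (List.pairwise_cons.1 hs).1 y hy
    have hxt : x ∉ t := fun hxx => lt_irrefl x (hx x hxx)
    have hnd : t.Nodup := (List.pairwise_cons.1 hs).2.imp ne_of_lt
    rw [lexPairs, List.count_append, ih (List.pairwise_cons.1 hs).2]
    have hmap : (t.map (fun y => (x, y))).count (i, j) = if i = x ∧ j ∈ t then 1 else 0 := by
      by_cases hix : i = x
      · subst hix
        have hinj : Function.Injective (fun y => (i, y) : α → α × α) := by
          intro a b hab; simpa using hab
        rw [List.count_map_of_injective _ _ hinj]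
        by_cases hj : j ∈ t
        · simp [hj, List.count_eq_one_of_mem hnd hj]
        · simp [hj, List.count_eq_zero_of_not_mem hj]
      · rw [List.count_eq_countP, List.countP_eq_zero.2]
        · simp [hix]
        · rintro p hp
          simp only [List.mem_map] at hp
          obtain ⟨y, hy, rfl⟩ := hp
          simp [BEq.beq]
          intro h; exact (hix h.symm).elim
    rw [hmap]
    by_cases hix : i = x
    · subst hix
      have hit : i ∉ t := hxt
      by_cases hj : j ∈ t
      · simp [hj, hit, hx j hj]
      · by_cases hjx : j = i
        · subst hjx; simp [hj, hit]
        · simp [hj, hit, hjx]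
    · by_cases hjx : j = x
      · subst hjx
        have hjt : j ∉ t := hxt
        by_cases hi : i ∈ t
        · simp [hi, hjt, hix, not_lt.2 (le_of_lt (hx i hi))]
        · simp [hi, hjt, hix]
      · simp [hix, hjx]


theorem getD_cntD (S : List (List Int)) (q : Int × Int) :
    (cntD S).getD q 0 = ((PallS S).count q : Int) := by
  rw [cntD_eq_flat, PySem.Dict.getD_foldl_insert_add_one]
  have hemp : (PySem.Dict.empty : PySem.Dict (Int × Int) Int).getD q 0 = 0 := rfl
  rw [hemp, zero_add]

theorem keys_cntD (S : List (List Int)) : (cntD S).keys = PySem.Set.ofList (PallS S) := by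
  rw [cntD_eq_flat, PySem.Dict.keys_foldl_insert (PallS S) (fun d q => d.getD q 0 + 1)]
  have hemp : (PySem.Dict.empty : PySem.Dict (Int × Int) Int).keys = [] := rfl
  rw [hemp, PySem.Set.update_nil_left]

theorem sum_map_ite {a : Type} (P : a → Prop) [DecidablePred P] :
    ∀ (l : List a), (l.map (fun x => if P x then (1:Nat) else 0)).sum
      = (l.filter (fun x => decide (P x))).length := by
  intro l
  induction l with
  | nil => rfl
  | cons x t ih =>
    by_cases h : P x
    · simp [h, ih]; omega
    · simp [h, ih]

theorem count_PallS (S : List (List Int)) (q : Int × Int) :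
    (PallS S).count q =
      ((KeyS S).filter (fun x => decide (q.1 ∈ occL S x ∧ q.2 ∈ occL S x ∧ q.1 < q.2))).length := by
  obtain ⟨i, j⟩ := q
  unfold PallS
  rw [List.count_flatMap, values_occD, List.map_map]
  rw [show ((List.count (i, j) ∘ lexPairs) ∘ occL S)
    = (fun x => if i ∈ occL S x ∧ j ∈ occL S x ∧ i < j then 1 else 0) from ?_]
  · exact sum_map_ite _ (KeyS S)
  · funext x
    exact count_lexPairs (occL S x) (pairwise_occL S x) i j

theorem mem_KeyS (S : List (List Int)) (x : Int) :
    x ∈ KeyS S ↔ ∃ (k : Nat) (h : k < S.length), x ∈ S[k] := by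
  unfold KeyS LmapS
  rw [PySem.Set.mem_ofList]
  simp only [List.mem_map, List.mem_flatMap, PySem.List.mem_enumerate_iff,
    PySem.List.dedup_eq_ofList]
  constructor
  · rintro ⟨⟨y, idx⟩, ⟨p, ⟨k, hk, rfl⟩, hy⟩, rfl⟩
    simp only [List.mem_map] at hy
    obtain ⟨z, hz, hzz⟩ := hy
    obtain ⟨rfl, -⟩ := Prod.mk.injEq .. ▸ hzz
    exact ⟨k, hk, (PySem.Set.mem_ofList _ _).1 hz⟩
  · rintro ⟨k, hk, hx⟩
    refine ⟨(x, (k : Int)), ⟨((k : Int), S[k]), ⟨k, hk, by simp⟩, ?_⟩, rfl⟩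
    simp only [List.mem_map]
    exact ⟨x, (PySem.Set.mem_ofList _ _).2 hx, rfl⟩

theorem mem_occL_nat (S : List (List Int)) (x : Int) (a : Nat) (ha : a < S.length) :
    ((a : Int) ∈ occL S x) ↔ x ∈ S[a] := by
  rw [mem_occL]
  constructor
  · rintro ⟨k, hk, hik, hx⟩
    have : k = a := by omega
    subst this; exact hx
  · intro hx; exact ⟨a, ha, rfl, hx⟩

theorem cOf_eq_filter_len (S : List (List Int)) (q : Int × Int) (hq : q ∈ RngP S) :
    cOf S q =
      (((KeyS S).filter (fun x => decide (q.1 ∈ occL S x ∧ q.2 ∈ occL S x ∧ q.1 < q.2))).length : Int) := by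
  obtain ⟨i, j⟩ := q
  unfold RngP at hq
  have hmem := (mem_lexPairs _ (PySem.List.pairwise_lt_pyRange_one _ _) _).1 hq
  simp only [PySem.List.mem_pyRange_one, PySem.List.len_eq] at hmem
  obtain ⟨⟨hi0, hin⟩, ⟨hj0, hjn⟩, hij⟩ := hmem
  have ha : i.toNat < S.length := by omega
  have hb : j.toNat < S.length := by omega
  have hieq : i = (i.toNat : Int) := by omega
  have hjeq : j = (j.toNat : Int) := by omega
  unfold cOf
  rw [PySem.List.pyGetD_eq_getElem _ _ hi0 (by simpa using hin),
      PySem.List.pyGetD_eq_getElem _ _ hj0 (by simpa using hjn)]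
  simp only [List.getElem_map]
  show ((PySem.Set.inter (PySem.Set.ofList S[i.toNat]) (PySem.Set.ofList S[j.toNat])).length : Int) = _
  congr 1
  apply List.Perm.length_eq
  rw [List.perm_ext_iff_of_nodup]
  · intro x
    show x ∈ List.filter _ (PySem.Set.ofList S[i.toNat]) ↔ _
    rw [List.mem_filter, List.mem_filter]
    simp only [PySem.Set.contains_iff, decide_eq_true_eq]
    constructor
    · rintro ⟨hxi, hxj⟩
      have hxi' : x ∈ S[i.toNat] := (PySem.Set.mem_ofList _ _).1 hxi
      have hxj' : x ∈ S[j.toNat] := (PySem.Set.mem_ofList _ _).1 hxj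
      refine ⟨(mem_KeyS S x).2 ⟨i.toNat, ha, hxi'⟩, ?_, ?_, hij⟩
      · rw [hieq, mem_occL_nat S x i.toNat ha]; exact hxi'
      · rw [hjeq, mem_occL_nat S x j.toNat hb]; exact hxj'
    · rintro ⟨hK, hio, hjo, -⟩
      rw [hieq, mem_occL_nat S x i.toNat ha] at hio
      rw [hjeq, mem_occL_nat S x j.toNat hb] at hjo
      exact ⟨(PySem.Set.mem_ofList _ _).2 hio, (PySem.Set.mem_ofList _ _).2 hjo⟩
  · exact (PySem.Set.nodup_ofList _).filter _
  · exact (PySem.Set.nodup_ofList _).filter _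

theorem mem_PallS (S : List (List Int)) (q : Int × Int) :
    q ∈ PallS S ↔ q ∈ RngP S ∧ 0 < cOf S q := by
  unfold PallS
  rw [values_occD]
  simp only [List.mem_flatMap, List.mem_map]
  constructor
  · rintro ⟨idxs, ⟨x, hxK, rfl⟩, hql⟩
    obtain ⟨h1, h2, hlt⟩ := (mem_lexPairs _ (pairwise_occL S x) q).1 hql
    obtain ⟨a, ha, haq, hxa⟩ := (mem_occL S x q.1).1 h1
    obtain ⟨b, hb, hbq, hxb⟩ := (mem_occL S x q.2).1 h2
    have hR : q ∈ RngP S := by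
      unfold RngP
      refine (mem_lexPairs _ (PySem.List.pairwise_lt_pyRange_one _ _) q).2
        ⟨PySem.List.mem_pyRange_one.2 ⟨by omega, ?_⟩,
         PySem.List.mem_pyRange_one.2 ⟨by omega, ?_⟩, hlt⟩
      · rw [PySem.List.len_eq, haq]; exact_mod_cast ha
      · rw [PySem.List.len_eq, hbq]; exact_mod_cast hb
    refine ⟨hR, ?_⟩
    rw [cOf_eq_filter_len S q hR]
    have hxf : x ∈ (KeyS S).filter
        (fun x => decide (q.1 ∈ occL S x ∧ q.2 ∈ occL S x ∧ q.1 < q.2)) :=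
      List.mem_filter.2 ⟨hxK, by simp only [decide_eq_true_eq]; exact ⟨h1, h2, hlt⟩⟩
    have : 0 < ((KeyS S).filter
        (fun x => decide (q.1 ∈ occL S x ∧ q.2 ∈ occL S x ∧ q.1 < q.2))).length :=
      List.length_pos_of_mem hxf
    exact_mod_cast this
  · rintro ⟨hR, hpos⟩
    rw [cOf_eq_filter_len S q hR] at hpos
    have hlen : 0 < ((KeyS S).filter
        (fun x => decide (q.1 ∈ occL S x ∧ q.2 ∈ occL S x ∧ q.1 < q.2))).length := by
      exact_mod_cast hpos
    obtain ⟨x, hx⟩ := List.exists_mem_of_length_pos hlen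
    rw [List.mem_filter] at hx
    obtain ⟨hxK, hxp⟩ := hx
    simp only [decide_eq_true_eq] at hxp
    exact ⟨occL S x, ⟨x, hxK, rfl⟩, (mem_lexPairs _ (pairwise_occL S x) q).2 hxp⟩

theorem pairwise_lexPairs {α : Type} [LinearOrder α] (xs : List α) (hs : xs.Pairwise (· < ·)) :
    (lexPairs xs).Pairwise (fun p q => p.1 < q.1 ∨ (p.1 = q.1 ∧ p.2 < q.2)) := by
  induction xs with
  | nil => exact List.Pairwise.nil
  | cons x t ih =>
    have hx : ∀ y ∈ t, x < y := fun y hy => (List.pairwise_cons.1 hs).1 y hy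
    have ht := (List.pairwise_cons.1 hs).2
    rw [lexPairs]
    apply List.pairwise_append.2
    refine ⟨List.pairwise_map.2 (ht.imp (fun h => Or.inr ⟨rfl, h⟩)), ih ht, ?_⟩
    rintro p hp q hq
    obtain ⟨y, hy, rfl⟩ := List.mem_map.1 hp
    exact Or.inl (hx _ (mem_of_mem_lexPairs hq).1)


theorem nodup_lexPairs {α : Type} [LinearOrder α] (xs : List α) (hs : xs.Pairwise (· < ·)) :
    (lexPairs xs).Nodup := by
  have := pairwise_lexPairs xs hs
  apply this.imp
  intro a b h hab
  subst hab
  rcases h with h | ⟨_, h⟩ <;> exact lt_irrefl _ h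


theorem cnt_count_eq_cOf (S : List (List Int)) (q : Int × Int) (hq : q ∈ RngP S) :
    ((PallS S).count q : Int) = cOf S q := by
  rw [count_PallS, cOf_eq_filter_len S q hq]

theorem nodup_RngP (S : List (List Int)) : (RngP S).Nodup :=
  nodup_lexPairs _ (PySem.List.pairwise_lt_pyRange_one _ _)

theorem vals_cntD (S : List (List Int)) :
    (cntD S).values = (PySem.Set.ofList (PallS S)).map (fun q => ((PallS S).count q : Int)) := by
  rw [PySem.Dict.values_eq_map_keys (cntD S) (by rw [keys_cntD]; exact PySem.Set.nodup_ofList _) 0,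
    keys_cntD]
  exact List.map_congr_left (fun q _ => getD_cntD S q)

theorem worst_eq (S : List (List Int)) :
    (RngP S).foldl (fun w q => if cOf S q > w then cOf S q else w) 0
      = PySem.List.maxD (cntD S).values (fun v => v) 0 := by
  have hfold : (RngP S).foldl (fun w q => if cOf S q > w then cOf S q else w) 0
      = ((RngP S).map (cOf S)).foldl max 0 := by
    rw [List.foldl_map]
    apply PySem.List.foldl_congr_mem
    intro acc q _
    by_cases h : cOf S q > acc
    · rw [if_pos h, max_eq_right (le_of_lt h)]
    · rw [if_neg h, max_eq_left (by omega)]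
  rw [hfold, vals_cntD]
  set vals := (PySem.Set.ofList (PallS S)).map (fun q => ((PallS S).count q : Int)) with hv
  have hv0 : ∀ v ∈ vals, 0 ≤ v := by
    rintro v hvv
    obtain ⟨q, _, rfl⟩ := List.mem_map.1 hvv
    exact Int.natCast_nonneg _
  have hmemval : ∀ v ∈ vals, ∃ q ∈ RngP S, v = cOf S q := by
    rintro v hvv
    obtain ⟨q, hqm, rfl⟩ := List.mem_map.1 hvv
    have hqP : q ∈ PallS S := (PySem.Set.mem_ofList _ _).1 hqm
    have hqR := (mem_PallS S q).1 hqP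
    exact ⟨q, hqR.1, cnt_count_eq_cOf S q hqR.1⟩
  have hA0 : (0:Int) ≤ ((RngP S).map (cOf S)).foldl max 0 :=
    (PySem.List.le_foldl_max _ 0).1
  show _ = PySem.List.maxD vals (fun v => v) 0
  cases hmx : PySem.List.max? vals (fun v => v) with
  | none =>
    have hnil : vals = [] := (PySem.List.max?_eq_none_iff vals (fun v => v)).1 hmx
    have hup : ((RngP S).map (cOf S)).foldl max 0 ≤ 0 := by
      rcases PySem.List.foldl_max_mem ((RngP S).map (cOf S)) 0 with h | h
      · omega
      · obtain ⟨q, hqR, hqe⟩ := List.mem_map.1 h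
        by_cases hpos : 0 < cOf S q
        · exfalso
          have : q ∈ PallS S := (mem_PallS S q).2 ⟨hqR, hpos⟩
          have : ((PallS S).count q : Int) ∈ vals :=
            List.mem_map_of_mem ((PySem.Set.mem_ofList _ _).2 this)
          rw [hnil] at this; exact absurd this (List.not_mem_nil)
        · omega
    have : PySem.List.maxD vals (fun v => v) 0 = 0 := by
      simp [PySem.List.maxD, hmx]
    omega
  | some m =>
    have hW : PySem.List.maxD vals (fun v => v) 0 = m := by
      simp [PySem.List.maxD, hmx]
    rw [hW]
    apply le_antisymm
    · rcases PySem.List.foldl_max_mem ((RngP S).map (cOf S)) 0 with h | h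
      · rw [h]
        exact hv0 m (PySem.List.max?_mem hmx)
      · obtain ⟨q, hqR, hqe⟩ := List.mem_map.1 h
        by_cases hpos : 0 < cOf S q
        · have hP : q ∈ PallS S := (mem_PallS S q).2 ⟨hqR, hpos⟩
          have hvv : ((PallS S).count q : Int) ∈ vals :=
            List.mem_map_of_mem ((PySem.Set.mem_ofList _ _).2 hP)
          have := PySem.List.max?_isMax hmx _ hvv
          rw [cnt_count_eq_cOf S q hqR] at this
          omega
        · have := hv0 m (PySem.List.max?_mem hmx)
          omega
    · obtain ⟨q, hqR, rfl⟩ := hmemval m (PySem.List.max?_mem hmx)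
      have : cOf S q ≤ ((RngP S).map (cOf S)).foldl max 0 :=
        (PySem.List.le_foldl_max _ 0).2 _ (List.mem_map_of_mem hqR)
      omega

theorem pairwise_insertBy_lex {α κ₁ κ₂ : Type} [LinearOrder κ₁] [LinearOrder κ₂]
    (k1 : α → κ₁) (k2 : α → κ₂) (x : α) (ys : List α)
    (hp : ys.Pairwise (fun a b => ¬ RltK k1 k2 b a)) :
    (PySem.List.insertBy
      (fun a b => decide (k1 a < k1 b) || (!decide (k1 b < k1 a) && decide (k2 a < k2 b)))
      x ys).Pairwise (fun a b => ¬ RltK k1 k2 b a) := by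
  set lt := fun a b => decide (k1 a < k1 b) || (!decide (k1 b < k1 a) && decide (k2 a < k2 b)) with hlt
  have hltR : ∀ a b, lt a b = true ↔ RltK k1 k2 a b := by
    intro a b
    simp only [hlt, Bool.or_eq_true, Bool.and_eq_true, Bool.not_eq_true', decide_eq_true_eq,
      decide_eq_false_iff_not, RltK]
    constructor
    · rintro (h | ⟨h1, h2⟩)
      · exact Or.inl h
      · rcases lt_trichotomy (k1 a) (k1 b) with h | h | h
        · exact Or.inl h
        · exact Or.inr ⟨h, h2⟩
        · exact (h1 h).elim
    · rintro (h | ⟨h1, h2⟩)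
      · exact Or.inl h
      · exact Or.inr ⟨by rw [h1]; exact lt_irrefl _, h2⟩
  have hRtrans : ∀ a b c, RltK k1 k2 a b → RltK k1 k2 b c → RltK k1 k2 a c := by
    rintro a b c (h | ⟨h1, h2⟩) (g | ⟨g1, g2⟩)
    · exact Or.inl (lt_trans h g)
    · exact Or.inl (g1 ▸ h)
    · exact Or.inl (h1 ▸ g)
    · exact Or.inr ⟨h1.trans g1, lt_trans h2 g2⟩
  have hRasym : ∀ a b, RltK k1 k2 a b → ¬ RltK k1 k2 b a := by
    rintro a b (h | ⟨h1, h2⟩) (g | ⟨g1, g2⟩)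
    · exact lt_asymm h g
    · rw [g1] at h; exact lt_irrefl _ h
    · rw [h1] at g; exact lt_irrefl _ g
    · exact lt_asymm h2 g2
  induction ys with
  | nil => simp [PySem.List.insertBy]
  | cons y ys ih =>
    have hy : ∀ z ∈ ys, ¬ RltK k1 k2 z y := fun z hz => (List.pairwise_cons.1 hp).1 z hz
    have hys := (List.pairwise_cons.1 hp).2
    show (PySem.List.insertBy lt x (y :: ys)).Pairwise _
    rw [PySem.List.insertBy]
    by_cases hxy : lt x y = true
    · rw [if_pos hxy]
      have hRxy : RltK k1 k2 x y := (hltR _ _).1 hxy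
      apply List.pairwise_cons.2
      refine ⟨?_, hp⟩
      intro z hz
      rcases List.mem_cons.1 hz with rfl | hz
      · exact hRasym _ _ hRxy
      · intro hzx
        exact hy z hz (hRtrans _ _ _ hzx hRxy)
    · rw [if_neg hxy]
      apply List.pairwise_cons.2
      refine ⟨?_, ih hys⟩
      intro z hz
      rcases (PySem.List.mem_insertBy lt x z ys).1 hz with rfl | hz
      · exact fun h => hxy ((hltR _ _).2 h)
      · exact hy z hz

theorem eq_of_perm_of_lex_sorted {α κ₁ κ₂ : Type} [LinearOrder κ₁] [LinearOrder κ₂]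
    (k1 : α → κ₁) (k2 : α → κ₂) (ys : List α) :
    ∀ zs : List α, zs.Perm ys → ys.Pairwise (RltK k1 k2) →
      zs.Pairwise (fun a b => ¬ RltK k1 k2 b a) → zs = ys := by
  induction ys with
  | nil => intro zs hperm _ _; exact hperm.eq_nil
  | cons a ys ih =>
    intro zs hperm hy hz
    cases zs with
    | nil => exact absurd hperm.symm (by simp)
    | cons b zs =>
      by_cases hab : b = a
      · subst hab
        have := ih zs hperm.cons_inv (List.pairwise_cons.1 hy).2 (List.pairwise_cons.1 hz).2
        rw [this]
      · exfalso
        have hbmem : b ∈ a :: ys := hperm.subset (List.mem_cons_self ..)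
        have hbys : b ∈ ys := by
          rcases List.mem_cons.1 hbmem with h | h
          · exact (hab h).elim
          · exact h
        have hRab : RltK k1 k2 a b := (List.pairwise_cons.1 hy).1 b hbys
        have hamem : a ∈ b :: zs := hperm.symm.subset (List.mem_cons_self ..)
        have hazs : a ∈ zs := by
          rcases List.mem_cons.1 hamem with h | h
          · exact (hab h.symm).elim
          · exact h
        exact (List.pairwise_cons.1 hz).1 a hazs hRab

theorem pairwise_foldl_insertBy_lex {α κ₁ κ₂ : Type} [LinearOrder κ₁] [LinearOrder κ₂]
    (k1 : α → κ₁) (k2 : α → κ₂) (xs : List α) : ∀ zs : List α,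
    zs.Pairwise (fun a b => ¬ RltK k1 k2 b a) →
    (xs.foldl (fun acc x => PySem.List.insertBy
      (fun a b => decide (k1 a < k1 b) || (!decide (k1 b < k1 a) && decide (k2 a < k2 b))) x acc)
      zs).Pairwise (fun a b => ¬ RltK k1 k2 b a) := by
  induction xs with
  | nil => intro zs h; exact h
  | cons x t ih => intro zs h; exact ih _ (pairwise_insertBy_lex k1 k2 x zs h)

theorem sorted2_eq_of_perm_of_pairwise_lex {α κ₁ κ₂ : Type} [LinearOrder κ₁] [LinearOrder κ₂]
    (xs ys : List α) (k1 : α → κ₁) (k2 : α → κ₂)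
    (hperm : ys.Perm xs)
    (hsort : ys.Pairwise (RltK k1 k2)) :
    PySem.List.sorted2 xs k1 k2 false = ys := by
  apply eq_of_perm_of_lex_sorted k1 k2 ys _
    ((PySem.List.sorted2_perm xs k1 k2 false).trans hperm.symm) hsort
  exact pairwise_foldl_insertBy_lex k1 k2 xs [] List.Pairwise.nil


theorem items_cntD (S : List (List Int)) :
    (cntD S).items = (PySem.Set.ofList (PallS S)).map (fun q => (q, ((PallS S).count q : Int))) := by
  rw [PySem.Dict.items_eq_map_keys (cntD S) (by rw [keys_cntD]; exact PySem.Set.nodup_ofList _) 0,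
    keys_cntD]
  exact List.map_congr_left (fun q _ => by rw [getD_cntD])

theorem bad_eq (S : List (List Int)) :
    PySem.List.sorted2 (((cntD S).items.filter (fun p => decide (2 < p.2))).map
        (fun p => (p.1.1, p.1.2, p.2))) (fun t => t.1) (fun t => t.2.1)
      = ((RngP S).filter (fun q => decide (2 < cOf S q))).map (fun q => (q.1, q.2, cOf S q)) := by
  apply sorted2_eq_of_perm_of_pairwise_lex
  · -- permutation
    rw [items_cntD, List.filter_map, List.map_map]
    have hpermpairs : ((RngP S).filter (fun q => decide (2 < cOf S q))).Perm
        ((PySem.Set.ofList (PallS S)).filter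
          ((fun p => decide (2 < p.2)) ∘ (fun q => (q, ((PallS S).count q : Int))))) := by
      rw [List.perm_ext_iff_of_nodup ((nodup_RngP S).filter _)
        ((PySem.Set.nodup_ofList _).filter _)]
      intro q
      simp only [List.mem_filter, Function.comp, decide_eq_true_eq]
      constructor
      · rintro ⟨hR, hc⟩
        have hP : q ∈ PallS S := (mem_PallS S q).2 ⟨hR, by omega⟩
        refine ⟨(PySem.Set.mem_ofList _ _).2 hP, ?_⟩
        rw [cnt_count_eq_cOf S q hR]; exact hc
      · rintro ⟨hm, hc⟩
        have hP : q ∈ PallS S := (PySem.Set.mem_ofList _ _).1 hm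
        have hR := ((mem_PallS S q).1 hP).1
        rw [cnt_count_eq_cOf S q hR] at hc
        exact ⟨hR, hc⟩
    have hmapeq : (((PySem.Set.ofList (PallS S)).filter
          ((fun p => decide (2 < p.2)) ∘ (fun q => (q, ((PallS S).count q : Int))))).map
          ((fun p : (Int × Int) × Int => (p.1.1, p.1.2, p.2)) ∘ (fun q => (q, ((PallS S).count q : Int)))))
        = (((PySem.Set.ofList (PallS S)).filter
          ((fun p => decide (2 < p.2)) ∘ (fun q => (q, ((PallS S).count q : Int))))).map
          (fun q => (q.1, q.2, cOf S q))) := by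
      apply List.map_congr_left
      intro q hqm
      have hP : q ∈ PallS S := (PySem.Set.mem_ofList _ _).1 (List.mem_filter.1 hqm).1
      have hR := ((mem_PallS S q).1 hP).1
      simp only [Function.comp]
      rw [cnt_count_eq_cOf S q hR]
    rw [hmapeq]
    exact hpermpairs.map _
  · -- sortedness
    have hpw := pairwise_lexPairs _ (PySem.List.pairwise_lt_pyRange_one 0 (PySem.List.len S))
    have : ((RngP S).filter (fun q => decide (2 < cOf S q))).Pairwise
        (fun p q => p.1 < q.1 ∨ (p.1 = q.1 ∧ p.2 < q.2)) := hpw.filter _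
    apply List.pairwise_map.2
    apply this.imp
    intro a b h
    exact h

-- ===== VERDICT (by name: the statement is the Claim_ definition above) =====
theorem pair_overlap_max_spec : Claim_equal_pair_overlap_max := by
  intro S _
  show pair_overlap_max S = pair_overlap_max_alt S
  rw [A_char, alt_char]
  refine Prod.ext ?_ ?_
  · exact worst_eq S
  · show (RngP S).foldl (fun b q => if cOf S q > 2 then b ++ [(q.1, q.2, cOf S q)] else b) [] = _
    rw [PySem.List.foldl_append_ite (p := fun q => cOf S q > 2)
      (f := fun (q : Int × Int) => (q.1, q.2, cOf S q)), List.nil_append]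
    exact (bad_eq S).symm
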